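-- pv_equiv track=rewrite | github.com/berkantaksoyx/nlp-implementations | byte_pair_encoding.py | bpeTokenize
-- ===== SOURCE A (Python) =====
-- def merged_tokens(word,pair):
--     new_word = []
--     new_subword = pair[0] + pair[1]
--     i = 0
--     while i < len(word):
--         if i < len(word) - 1 and word[i] == pair[0] and word[i+1] == pair[1]:
--                 new_word.append(new_subword)
--                 i += 2
--         else:
--                 new_word.append(word[i])
--                 i += 1
--     return new_word
--
-- def bpeTokenize(str, merges):
--     corpus = str.split()
--     for i in range(len(corpus)):
--         word = corpus[i]
--         corpus[i] = " " + word + "_"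
--         chars = list(corpus[i])
--         corpus[i] = chars
--
--     for pair in merges:
--         for i in range(len(corpus)):
--             word = corpus[i]
--             nw = merged_tokens(word,pair[0])
--             corpus[i] = nw
--     return corpus
-- ===== SOURCE B (Python) =====
-- def merged_pass(word, pair):
--     out = []
--     for c in word:
--         if out and out[-1] == pair[0] and c == pair[1]:
--             out[-1] = pair[0] + pair[1]
--         else:
--             out.append(c)
--     return out
--
-- def bpeTokenize(str, merges):
--     result = []
--     for w in str.split():
--         word = list(" " + w + "_")
--         for m in merges:
--             word = merged_pass(word, m[0])
--         result.append(word)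
--     return result
-- ===== Notes on version B (the rewrite author's own statement) =====
-- stated objective: alternative
-- what changed: Per-merge pass rewritten as a stack fold (compare each token with the last emitted symbol, merging in place via out[-1]=...) instead of index arithmetic with i+=2 lookahead, and the loop nesting is swapped: each word is folded through all merges instead of sweeping the whole corpus per merge.
import Mathlib
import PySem

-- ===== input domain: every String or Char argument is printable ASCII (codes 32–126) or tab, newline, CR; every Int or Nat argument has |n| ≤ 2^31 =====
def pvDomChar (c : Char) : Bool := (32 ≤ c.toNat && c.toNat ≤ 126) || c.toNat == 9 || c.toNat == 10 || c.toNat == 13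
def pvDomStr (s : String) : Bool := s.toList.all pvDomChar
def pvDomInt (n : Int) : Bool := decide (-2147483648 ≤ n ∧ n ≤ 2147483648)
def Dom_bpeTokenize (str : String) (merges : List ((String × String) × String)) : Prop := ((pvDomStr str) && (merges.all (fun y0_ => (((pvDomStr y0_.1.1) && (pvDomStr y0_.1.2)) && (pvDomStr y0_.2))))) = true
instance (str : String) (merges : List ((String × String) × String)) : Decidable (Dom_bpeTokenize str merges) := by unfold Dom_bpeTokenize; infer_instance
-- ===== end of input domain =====

-- B keeps the preprocessing but swaps the loop nesting (fold each word through all merges)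
-- and replaces the index/lookahead pass by a stack pass comparing with the last emitted symbol;
-- objective: alternative decomposition, same asymptotic cost.


-- ===== PORT A =====
-- merged_tokens: the while loop over index i becomes recursion on the token list
-- (i < len-1 with word[i], word[i+1] matching = the list has two leading elements matching).
def mergedTokens (word : List String) (pair : String × String) : List String :=
  match word with
  | a :: b :: rest =>
      if a = pair.1 ∧ b = pair.2 then (pair.1 ++ pair.2) :: mergedTokens rest pair
      else a :: mergedTokens (b :: rest) pair
  | [a] => [a]
  | [] => []

def bpeTokenize (str : String) (merges : List ((String × String) × String)) : List (List String) :=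
  -- first loop: corpus[i] = list(" " + word + "_")
  let corpus := (PySem.Str.split₀ str).map
    (fun w => (" " ++ w ++ "_").toList.map (fun c => String.singleton c))
  -- for pair in merges: for i in range(len(corpus)): corpus[i] = merged_tokens(corpus[i], pair[0])
  merges.foldl (fun corpus pair => corpus.map (fun word => mergedTokens word pair.1)) corpus

-- ===== PORT B =====
-- merged_pass: out used as a stack; head of the accumulator is Python's out[-1], reversed at the end.
def mergeStep (pair : String × String) (acc : List String) (c : String) : List String :=
  match acc with
  | l :: rest => if l = pair.1 ∧ c = pair.2 then (pair.1 ++ pair.2) :: rest else c :: l :: rest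
  | [] => [c]

def mergePass (pair : String × String) (word : List String) : List String :=
  (word.foldl (mergeStep pair) []).reverse

def bpeTokenize_alt (str : String) (merges : List ((String × String) × String)) : List (List String) :=
  (PySem.Str.split₀ str).map (fun w =>
    merges.foldl (fun word m => mergePass m.1 word)
      ((" " ++ w ++ "_").toList.map (fun c => String.singleton c)))

-- ===== PRECONDITION & SPEC =====
def Spec_bpeTokenize (str : String) (merges : List ((String × String) × String)) (out : List (List String)) : Prop := out = bpeTokenize_alt str merges
instance (str : String) (merges : List ((String × String) × String)) (out : List (List String)) : Decidable (Spec_bpeTokenize str merges out) := by unfold Spec_bpeTokenize; infer_instance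

-- ===== CLAIM (what is proved, stated in full; the proofs are below) =====
def Claim_equal_bpeTokenize : Prop := ∀ (str : String) (merges : List ((String × String) × String)), Dom_bpeTokenize str merges → Spec_bpeTokenize str merges (bpeTokenize str merges)

-- ===== LEMMAS AND PROOFS =====

lemma append_ne_left (a b : String) (h : b ≠ "") : a ++ b ≠ a := by
  intro h2
  have h3 := congrArg String.toList h2
  simp at h3
  exact h (by cases b; simp_all)

-- every token produced by a merge pass is nonempty if the input tokens are
lemma mergedTokens_ne_empty (word : List String) (pair : String × String)
    (h : ∀ t ∈ word, t ≠ "") : ∀ t ∈ mergedTokens word pair, t ≠ "" := by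
  induction word using mergedTokens.induct pair with
  | case1 a b rest hm ih =>
      rw [mergedTokens, if_pos hm]
      intro t ht
      rcases List.mem_cons.mp ht with h1 | h1
      · subst h1
        have ha : a ≠ "" := h a (by simp)
        rw [← hm.1]
        intro hc
        apply ha
        cases a
        cases pair.2
        simp_all
      · exact ih (fun t ht => h t (by simp [ht])) t h1
  | case2 a b rest hm ih =>
      rw [mergedTokens, if_neg hm]
      intro t ht
      rcases List.mem_cons.mp ht with h1 | h1
      · exact h1 ▸ h a (by simp)
      · exact ih (fun t ht => h t (List.mem_cons_of_mem _ ht)) t h1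
  | case3 a =>
      intro t ht
      simp [mergedTokens] at ht
      exact ht ▸ h a (by simp)
  | case4 => simp [mergedTokens]

-- the stack fold agrees with the index scan, for nonempty tokens,
-- provided the stack head cannot immediately merge with the first token
lemma stack_eq (pair : String × String) (word : List String) :
    ∀ acc : List String, (∀ t ∈ word, t ≠ "") →
      (acc.head? = some pair.1 → word.head? ≠ some pair.2) →
      word.foldl (mergeStep pair) acc = (mergedTokens word pair).reverse ++ acc := by
  induction word using mergedTokens.induct pair with
  | case1 a b rest hm ih =>
      intro acc hne hhd
      obtain ⟨ha, hb⟩ := hm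
      have hb' : pair.2 ≠ "" := hb ▸ hne b (by simp)
      have hstep1 : mergeStep pair acc a = a :: acc := by
        cases acc with
        | nil => rfl
        | cons l ls =>
            simp only [mergeStep]
            rw [if_neg]
            rintro ⟨hl, hc⟩
            exact hhd (by simp [hl]) (by simp [← hc])
      have hstep2 : mergeStep pair (a :: acc) b = (pair.1 ++ pair.2) :: acc := by
        simp [mergeStep, ha, hb]
      rw [List.foldl_cons, hstep1, List.foldl_cons, hstep2]
      rw [ih ((pair.1 ++ pair.2) :: acc) (fun t ht => hne t (by simp [ht]))
        (by intro hh _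
            exact absurd (Option.some_inj.mp hh) (append_ne_left pair.1 pair.2 hb'))]
      rw [mergedTokens, if_pos ⟨ha, hb⟩]
      simp
  | case2 a b rest hm ih =>
      intro acc hne hhd
      have hstep1 : mergeStep pair acc a = a :: acc := by
        cases acc with
        | nil => rfl
        | cons l ls =>
            simp only [mergeStep]
            rw [if_neg]
            rintro ⟨hl, hc⟩
            exact hhd (by simp [hl]) (by simp [← hc])
      rw [List.foldl_cons, hstep1]
      rw [ih (a :: acc) (fun t ht => hne t (List.mem_cons_of_mem _ ht))
        (by intro hh hc
            exact hm ⟨Option.some_inj.mp hh, Option.some_inj.mp hc⟩)]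
      rw [mergedTokens, if_neg hm]
      simp
  | case3 a =>
      intro acc hne hhd
      have hstep1 : mergeStep pair acc a = a :: acc := by
        cases acc with
        | nil => rfl
        | cons l ls =>
            simp only [mergeStep]
            rw [if_neg]
            rintro ⟨hl, hc⟩
            exact hhd (by simp [hl]) (by simp [← hc])
      simp [hstep1, mergedTokens]
  | case4 =>
      intro acc _ _
      simp [mergedTokens]

lemma mergePass_eq (pair : String × String) (word : List String) (h : ∀ t ∈ word, t ≠ "") :
    mergePass pair word = mergedTokens word pair := by
  unfold mergePass
  rw [stack_eq pair word [] h (by simp)]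
  simp

-- per word, folding through the merges agrees
lemma folds_eq (merges : List ((String × String) × String)) :
    ∀ word : List String, (∀ t ∈ word, t ≠ "") →
      merges.foldl (fun w m => mergedTokens w m.1) word
        = merges.foldl (fun word m => mergePass m.1 word) word := by
  induction merges with
  | nil => intro word _; rfl
  | cons m ms ih =>
      intro word h
      simp only [List.foldl_cons]
      rw [← mergePass_eq m.1 word h]
      exact ih _ (by rw [mergePass_eq m.1 word h]; exact mergedTokens_ne_empty word m.1 h)

-- the per-merge map over the corpus commutes into a per-word fold over the merges
lemma fold_map_comm {α β : Type} (g : β → α → α) (l : List β) :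
    ∀ corpus : List α,
      l.foldl (fun c m => c.map (g m)) corpus = corpus.map (fun w => l.foldl (fun w m => g m w) w) := by
  induction l with
  | nil => intro corpus; simp
  | cons m ms ih =>
      intro corpus
      simp only [List.foldl_cons]
      rw [ih (corpus.map (g m)), List.map_map]
      rfl

lemma singleton_tokens_ne_empty (w : String) :
    ∀ t ∈ (" " ++ w ++ "_").toList.map (fun c => String.singleton c), t ≠ "" := by
  intro t ht
  obtain ⟨c, _, hc⟩ := List.mem_map.mp ht
  subst hc
  simp

-- ===== VERDICT (by name: the statement is the Claim_ definition above) =====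
theorem bpeTokenize_spec : Claim_equal_bpeTokenize := by
  intro str merges _
  unfold Spec_bpeTokenize bpeTokenize bpeTokenize_alt
  rw [fold_map_comm (fun pair word => mergedTokens word pair.1) merges, List.map_map]
  apply List.map_congr_left
  intro w _
  exact folds_eq merges _ (singleton_tokens_ne_empty w)
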